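-- pv_equiv track=rewrite | github.com/eliejerjees/hack-davidson-2026 | reaper_py/elevenlabs_agent.py | _join_word_tokens
-- ===== SOURCE A (Python) =====
-- def _join_word_tokens(tokens: list[str]) -> str:
--     punctuation = {".", ",", "!", "?", ";", ":"}
--     pieces: list[str] = []
--     for token in tokens:
--         value = token.strip()
--         if not value:
--             continue
--         if pieces and value in punctuation:
--             pieces[-1] = pieces[-1] + value
--         else:
--             pieces.append(value)
--     return " ".join(pieces).strip()
-- ===== SOURCE B (Python) =====
-- def _join_word_tokens(tokens: list[str]) -> str:
--     punctuation = {".", ",", "!", "?", ";", ":"}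
--     vals = [t.strip() for t in tokens if t.strip()]
--     if not vals:
--         return ""
--     return vals[0] + "".join(v if v in punctuation else " " + v for v in vals[1:])
-- ===== Notes on version B (the rewrite author's own statement) =====
-- stated objective: simpler
-- what changed: Replaces the accumulator loop that mutates the last piece in place with a filtered comprehension of stripped tokens joined by a conditional separator (no space before standalone punctuation), dropping the final strip.
import Mathlib
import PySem

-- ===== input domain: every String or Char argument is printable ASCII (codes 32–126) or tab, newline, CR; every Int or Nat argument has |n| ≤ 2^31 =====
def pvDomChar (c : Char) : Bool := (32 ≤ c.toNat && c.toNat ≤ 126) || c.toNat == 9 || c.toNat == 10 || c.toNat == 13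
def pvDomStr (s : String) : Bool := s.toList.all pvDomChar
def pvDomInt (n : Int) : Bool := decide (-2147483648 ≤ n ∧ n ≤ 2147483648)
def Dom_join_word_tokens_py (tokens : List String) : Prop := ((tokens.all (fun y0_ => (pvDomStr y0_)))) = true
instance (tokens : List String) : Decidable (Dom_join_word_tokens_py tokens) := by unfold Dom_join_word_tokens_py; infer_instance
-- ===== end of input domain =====

-- B replaces A's accumulator loop (which mutates the last piece in place and re-strips the join)
-- by a filtered comprehension of stripped tokens joined with a conditional separator: simpler.

-- ===== PORT A =====
def join_word_tokens_py (tokens : List String) : String :=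
  let punctuation : PySem.Set String := PySem.Set.ofList [".", ",", "!", "?", ";", ":"]
  let pieces : List String := tokens.foldl (fun pieces token =>
    let value := PySem.Str.strip token
    if value = "" then pieces
    else if pieces ≠ [] ∧ value ∈ punctuation then
      pieces.dropLast ++ [(pieces.getLast?.getD "") ++ value]   -- pieces[-1] = pieces[-1] + value
    else
      pieces ++ [value]) []
  PySem.Str.strip (PySem.Str.join " " pieces)

-- ===== PORT B =====
def join_word_tokens_py_alt (tokens : List String) : String :=
  let punctuation : PySem.Set String := PySem.Set.ofList [".", ",", "!", "?", ";", ":"]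
  let vals : List String := tokens.filterMap (fun t =>
    let v := PySem.Str.strip t
    if v = "" then none else some v)
  match vals with
  | [] => ""
  | v :: rest =>
      v ++ PySem.Str.join "" (rest.map (fun w => if w ∈ punctuation then w else " " ++ w))

-- ===== PRECONDITION & SPEC =====
def Spec_join_word_tokens_py (tokens : List String) (out : String) : Prop := out = join_word_tokens_py_alt tokens
instance (tokens : List String) (out : String) : Decidable (Spec_join_word_tokens_py tokens out) := by unfold Spec_join_word_tokens_py; infer_instance

-- ===== CLAIM (what is proved, stated in full; the proofs are below) =====
def Claim_equal_join_word_tokens_py : Prop := ∀ (tokens : List String), Dom_join_word_tokens_py tokens → Spec_join_word_tokens_py tokens (join_word_tokens_py tokens)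

-- ===== LEMMAS AND PROOFS =====

-- the punctuation set, A's loop body, B's cleaned token list and B's separator map, as names
def pvPunct : PySem.Set String := PySem.Set.ofList [".", ",", "!", "?", ";", ":"]

def pvStepA (pieces : List String) (token : String) : List String :=
  let value := PySem.Str.strip token
  if value = "" then pieces
  else if pieces ≠ [] ∧ value ∈ pvPunct then
    pieces.dropLast ++ [(pieces.getLast?.getD "") ++ value]
  else
    pieces ++ [value]

def pvVals (tokens : List String) : List String :=
  tokens.filterMap (fun t =>
    let v := PySem.Str.strip t
    if v = "" then none else some v)

def pvG (w : String) : String := if w ∈ pvPunct then w else " " ++ w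

theorem A_eq (tokens : List String) :
    join_word_tokens_py tokens
      = PySem.Str.strip (PySem.Str.join " " (tokens.foldl pvStepA [])) := rfl

theorem alt_eq (tokens : List String) :
    join_word_tokens_py_alt tokens
      = (match pvVals tokens with
         | [] => ""
         | v :: rest => v ++ PySem.Str.join "" (rest.map pvG)) := rfl

-- "good" strings: nonempty, no leading and no trailing whitespace
def GoodS (s : String) : Prop :=
  s.toList ≠ [] ∧
  s.toList.head?.all (fun c => !PySem.Chars.isspace c) = true ∧
  s.toList.getLast?.all (fun c => !PySem.Chars.isspace c) = true

theorem head?_dropWhile_all {α : Type} (p : α → Bool) (l : List α) :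
    ((l.dropWhile p).head?.all (fun c => !p c)) = true := by
  cases h : l.dropWhile p with
  | nil => simp
  | cons a t =>
    have w : l.dropWhile p ≠ [] := by simp [h]
    have hp := List.head_dropWhile_not p w
    simp [h] at hp
    simp [hp]

theorem good_strip (t : String) (h : PySem.Str.strip t ≠ "") : GoodS (PySem.Str.strip t) := by
  have hnil : (PySem.Str.strip t).toList ≠ [] := by
    intro hx; exact h (String.toList_eq_nil_iff.mp hx)
  have htl : (PySem.Str.strip t).toList
      = (List.dropWhile PySem.Chars.isspace
          (List.dropWhile PySem.Chars.isspace t.toList).reverse).reverse := by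
    simp [PySem.Str.toList_strip, PySem.Chars.strip, PySem.Chars.rstrip, PySem.Chars.lstrip]
  rw [htl] at hnil
  refine ⟨by rw [htl]; exact hnil, ?_, ?_⟩
  · rw [htl]
    have hsfx : List.dropWhile PySem.Chars.isspace
          (List.dropWhile PySem.Chars.isspace t.toList).reverse
        <:+ (List.dropWhile PySem.Chars.isspace t.toList).reverse :=
      List.dropWhile_suffix _
    have hpre : (List.dropWhile PySem.Chars.isspace
          (List.dropWhile PySem.Chars.isspace t.toList).reverse).reverse
        <+: List.dropWhile PySem.Chars.isspace t.toList := by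
      exact List.reverse_suffix.mp (by simpa using hsfx)
    obtain ⟨u, hu⟩ := hpre
    have hrh : (List.dropWhile PySem.Chars.isspace
          (List.dropWhile PySem.Chars.isspace t.toList).reverse).reverse.head?
        = (List.dropWhile PySem.Chars.isspace t.toList).head? := by
      conv_rhs => rw [← hu]
      exact (List.head?_append_of_ne_nil _ hnil).symm
    rw [hrh]
    exact head?_dropWhile_all PySem.Chars.isspace t.toList
  · rw [htl, List.getLast?_reverse]
    exact head?_dropWhile_all PySem.Chars.isspace
      (List.dropWhile PySem.Chars.isspace t.toList).reverse

theorem strip_eq_self (s : String) (h : GoodS s) : PySem.Str.strip s = s := by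
  obtain ⟨hn, hh, hl⟩ := h
  apply String.toList_inj.mp
  rw [PySem.Str.toList_strip]
  have hls : List.dropWhile PySem.Chars.isspace s.toList = s.toList := by
    cases hc : s.toList with
    | nil => simp
    | cons a t =>
      rw [hc] at hh; simp at hh
      simp [hh]
  have hrs : List.dropWhile PySem.Chars.isspace s.toList.reverse = s.toList.reverse := by
    cases hc : s.toList.reverse with
    | nil => simp
    | cons b t =>
      have hb : s.toList.reverse.head? = some b := by rw [hc]; simp
      rw [List.head?_reverse] at hb
      rw [hb] at hl; simp at hl
      simp [hl]
  simp [PySem.Chars.strip, PySem.Chars.lstrip, PySem.Chars.rstrip, hls, hrs]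

theorem strJoin_nil (sep : String) : PySem.Str.join sep [] = "" := by
  apply String.toList_inj.mp
  simp [PySem.Str.toList_join, PySem.Chars.join_nil]

theorem strJoin_singleton (sep x : String) : PySem.Str.join sep [x] = x := by
  apply String.toList_inj.mp
  simp [PySem.Str.toList_join, PySem.Chars.join_singleton]

theorem strJoin_cons_cons (sep a b : String) (l : List String) :
    PySem.Str.join sep (a :: b :: l) = a ++ sep ++ PySem.Str.join sep (b :: l) := by
  apply String.toList_inj.mp
  simp [PySem.Str.toList_join, PySem.Chars.join_cons_cons]

theorem strJoin_cons_ne (sep a : String) (l : List String) (hl : l ≠ []) :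
    PySem.Str.join sep (a :: l) = a ++ sep ++ PySem.Str.join sep l := by
  cases l with
  | nil => exact absurd rfl hl
  | cons b t => exact strJoin_cons_cons sep a b t

theorem strJoin_empty_cons (a : String) (l : List String) :
    PySem.Str.join "" (a :: l) = a ++ PySem.Str.join "" l := by
  cases l with
  | nil => simp [strJoin_singleton, strJoin_nil]
  | cons b t =>
      rw [strJoin_cons_cons]
      apply String.toList_inj.mp
      simp

theorem good_punct (v : String) (h : v ∈ pvPunct) : GoodS v := by
  rw [pvPunct, PySem.Set.mem_ofList] at h
  simp at h
  rcases h with h | h | h | h | h | h <;> subst h <;>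
    exact ⟨by decide, by decide, by decide⟩

theorem good_append_tail (a b : String) (ha : GoodS a) (hb : b.toList ≠ [])
    (hlast : b.toList.getLast?.all (fun c => !PySem.Chars.isspace c) = true) :
    GoodS (a ++ b) := by
  obtain ⟨han, hah, hal⟩ := ha
  refine ⟨?_, ?_, ?_⟩
  · rw [String.toList_append]
    intro hx
    exact han (List.append_eq_nil_iff.mp hx).1
  · rw [String.toList_append, List.head?_append_of_ne_nil _ han]
    exact hah
  · rw [String.toList_append, List.getLast?_append_of_ne_nil _ hb]
    exact hlast

theorem good_append (a b : String) (ha : GoodS a) (hb : GoodS b) : GoodS (a ++ b) :=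
  good_append_tail a b ha hb.1 hb.2.2

theorem good_g (w : String) (hw : GoodS w) (v : String) (hv : GoodS v) :
    GoodS (v ++ pvG w) := by
  rw [pvG]
  split
  · exact good_append v w hv hw
  · refine good_append_tail v (" " ++ w) hv ?_ ?_
    · simp [String.toList_append]
    · rw [String.toList_append, List.getLast?_append_of_ne_nil _ hw.1]
      exact hw.2.2

theorem joinJ1 : ∀ (p : List String), p ≠ [] → ∀ (v : String),
    PySem.Str.join " " (p.dropLast ++ [(p.getLast?.getD "") ++ v])
      = PySem.Str.join " " p ++ v := by
  intro p
  induction p with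
  | nil => intro h; exact absurd rfl h
  | cons x p' ih =>
    intro _ v
    cases p' with
    | nil => simp [strJoin_singleton]
    | cons y t =>
      have h1 : (x :: y :: t).dropLast = x :: (y :: t).dropLast := rfl
      have h2 : (x :: y :: t).getLast? = (y :: t).getLast? := List.getLast?_cons_cons ..
      rw [h1, h2, List.cons_append,
        strJoin_cons_ne _ _ _ (by simp), strJoin_cons_cons,
        ih (by simp) v]
      simp [String.append_assoc]

theorem joinJ2 : ∀ (p : List String), p ≠ [] → ∀ (v : String),
    PySem.Str.join " " (p ++ [v]) = PySem.Str.join " " p ++ " " ++ v := by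
  intro p
  induction p with
  | nil => intro h; exact absurd rfl h
  | cons x p' ih =>
    intro _ v
    cases p' with
    | nil => simp [strJoin_cons_cons, strJoin_singleton]
    | cons y t =>
      rw [List.cons_append, strJoin_cons_ne _ _ _ (by simp),
        strJoin_cons_cons, ih (by simp) v]
      simp [String.append_assoc]

theorem vals_good (tokens : List String) : ∀ w ∈ pvVals tokens, GoodS w := by
  intro w hw
  rw [pvVals, List.mem_filterMap] at hw
  obtain ⟨t, _, ht⟩ := hw
  by_cases hv : PySem.Str.strip t = ""
  · simp [hv] at ht
  · simp [hv] at ht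
    subst ht
    exact good_strip t hv

theorem good_join_g : ∀ (l : List String), (∀ w ∈ l, GoodS w) → ∀ (v : String), GoodS v →
    GoodS (v ++ PySem.Str.join "" (l.map pvG)) := by
  intro l
  induction l with
  | nil => intro _ v hv; simpa [strJoin_nil] using hv
  | cons a l' ih =>
    intro hl v hv
    rw [List.map_cons, strJoin_empty_cons, ← String.append_assoc]
    exact ih (fun w hw => hl w (by simp [hw])) (v ++ pvG a)
      (good_g a (hl a (by simp)) v hv)

theorem pvVals_cons_skip (t : String) (toks : List String) (hv : PySem.Str.strip t = "") :
    pvVals (t :: toks) = pvVals toks := by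
  simp [pvVals, hv]

theorem pvVals_cons (t : String) (toks : List String) (hv : PySem.Str.strip t ≠ "") :
    pvVals (t :: toks) = PySem.Str.strip t :: pvVals toks := by
  simp [pvVals, hv]

theorem foldA_join : ∀ (toks : List String) (p : List String), p ≠ [] →
    (∀ q ∈ p, GoodS q) →
    PySem.Str.join " " (toks.foldl pvStepA p)
      = PySem.Str.join " " p ++ PySem.Str.join "" ((pvVals toks).map pvG) := by
  intro toks
  induction toks with
  | nil =>
    intro p _ _
    simp [pvVals, strJoin_nil]
  | cons t toks' ih =>
    intro p hp hg
    rw [List.foldl_cons]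
    by_cases hv : PySem.Str.strip t = ""
    · rw [pvVals_cons_skip t toks' hv]
      have hstep : pvStepA p t = p := by simp [pvStepA, hv]
      rw [hstep]
      exact ih p hp hg
    · rw [pvVals_cons t toks' hv, List.map_cons, strJoin_empty_cons]
      by_cases hm : PySem.Str.strip t ∈ pvPunct
      · have hstep : pvStepA p t
            = p.dropLast ++ [(p.getLast?.getD "") ++ PySem.Str.strip t] := by
          simp [pvStepA, hv, hp, hm]
        have hgl : GoodS (p.getLast?.getD "") := by
          have := List.getLast?_eq_some_getLast hp
          rw [this]
          exact hg _ (List.getLast_mem hp)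
        have hp' : p.dropLast ++ [(p.getLast?.getD "") ++ PySem.Str.strip t] ≠ [] := by simp
        have hg' : ∀ q ∈ p.dropLast ++ [(p.getLast?.getD "") ++ PySem.Str.strip t], GoodS q := by
          intro q hq
          rcases List.mem_append.mp hq with hq | hq
          · exact hg q (List.dropLast_subset _ hq)
          · simp at hq; subst hq
            exact good_append _ _ hgl (good_punct _ hm)
        rw [hstep, ih _ hp' hg', joinJ1 p hp]
        have : pvG (PySem.Str.strip t) = PySem.Str.strip t := by simp [pvG, hm]
        rw [this, String.append_assoc]
      · have hstep : pvStepA p t = p ++ [PySem.Str.strip t] := by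
          simp [pvStepA, hv, hm]
        have hp' : p ++ [PySem.Str.strip t] ≠ [] := by simp
        have hg' : ∀ q ∈ p ++ [PySem.Str.strip t], GoodS q := by
          intro q hq
          rcases List.mem_append.mp hq with hq | hq
          · exact hg q hq
          · simp at hq; subst hq; exact good_strip t hv
        rw [hstep, ih _ hp' hg', joinJ2 p hp]
        have : pvG (PySem.Str.strip t) = " " ++ PySem.Str.strip t := by simp [pvG, hm]
        rw [this]
        simp [String.append_assoc]

theorem main_eq : ∀ (toks : List String),
    PySem.Str.strip (PySem.Str.join " " (toks.foldl pvStepA []))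
      = (match pvVals toks with
         | [] => ""
         | v :: rest => v ++ PySem.Str.join "" (rest.map pvG)) := by
  intro toks
  induction toks with
  | nil => simp [pvVals, strJoin_nil]; decide
  | cons t toks' ih =>
    by_cases hv : PySem.Str.strip t = ""
    · rw [List.foldl_cons]
      have hstep : pvStepA [] t = [] := by simp [pvStepA, hv]
      rw [hstep, pvVals_cons_skip t toks' hv]
      exact ih
    · rw [List.foldl_cons]
      have hstep : pvStepA [] t = [PySem.Str.strip t] := by simp [pvStepA, hv]
      rw [hstep, pvVals_cons t toks' hv]
      have hgv : GoodS (PySem.Str.strip t) := good_strip t hv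
      rw [foldA_join toks' [PySem.Str.strip t] (by simp) (by intro q hq; simp at hq; subst hq; exact hgv),
        strJoin_singleton]
      exact strip_eq_self _ (good_join_g (pvVals toks') (vals_good toks') _ hgv)

-- ===== VERDICT (by name: the statement is the Claim_ definition above) =====
theorem join_word_tokens_py_spec : Claim_equal_join_word_tokens_py := by
  intro tokens _
  show join_word_tokens_py tokens = join_word_tokens_py_alt tokens
  rw [A_eq, alt_eq, main_eq]
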